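-- pv_equiv track=rewrite | github.com/T-PYTHON-OCT-23/LAB_DICTIONARY | labDic.py | rearrangesList
-- ===== SOURCE A (Python) =====
-- def rearrangesList(list1 )-> list:
--     list1.sort()
--     for n in list1:
--         if n in list1:
--             if n == 0:
--              list1.remove(n)
--              list1.append(n)
--
--     return list1
-- ===== SOURCE B (Python) =====
-- def rearrangesList(list1) -> list:
--     list1.sort()
--     nonzeros = [x for x in list1 if x != 0]
--     zeros = [x for x in list1 if x == 0]
--     list1[:] = nonzeros + zeros
--     return list1
-- ===== Notes on version B (the rewrite author's own statement) =====
-- stated objective: faster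
-- what changed: Replaced A's index-walking remove/append loop over the mutating sorted list (each remove is a linear scan) with two filter passes (nonzeros, zeros) and one concatenation written back in place.
import Mathlib
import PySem

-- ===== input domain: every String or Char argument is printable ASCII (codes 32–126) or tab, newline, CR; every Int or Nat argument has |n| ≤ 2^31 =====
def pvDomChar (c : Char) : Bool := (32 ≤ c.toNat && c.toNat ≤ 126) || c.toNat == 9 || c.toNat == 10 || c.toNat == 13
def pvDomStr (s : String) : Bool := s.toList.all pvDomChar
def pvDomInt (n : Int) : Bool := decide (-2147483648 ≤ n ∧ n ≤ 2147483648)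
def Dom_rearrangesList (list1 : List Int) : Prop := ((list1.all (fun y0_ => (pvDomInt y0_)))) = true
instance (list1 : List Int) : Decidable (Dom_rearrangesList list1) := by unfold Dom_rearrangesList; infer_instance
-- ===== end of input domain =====

-- B replaces A's index-walking remove/append loop over the mutating sorted list (each remove is a
-- linear scan, quadratic when many zeros) by two filter passes plus a concatenation (objective:
-- faster, measured). Both A and B mutate list1 in Python to the same final
-- contents; the theorems are about the returned value.

-- ===== PORT A =====
-- Python's `for n in list1` over a list mutated in the body reads list1[i] by an internal index i
-- that only ever increments; the list's LENGTH is constant here (remove+append), so fuel = length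
-- makes the recursion exact: the loop stops exactly when i reaches the length (pyGet? = none).
def pvLoopA : Nat → Nat → List Int → List Int
  | 0, _, l => l
  | fuel+1, i, l =>
    match PySem.List.pyGet? l (i : Int) with
    | none => l
    | some n =>
      pvLoopA fuel (i+1)
        (if l.contains n then
          if n = 0 then ((PySem.List.remove? l n).getD l) ++ [n] else l
        else l)

def rearrangesList (list1 : List Int) : List Int :=
  let s := PySem.List.sorted list1 (fun x => x) false   -- list1.sort()
  pvLoopA s.length 0 s

-- ===== PORT B =====
def rearrangesList_alt (list1 : List Int) : List Int :=
  let s := PySem.List.sorted list1 (fun x => x) false   -- list1.sort()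
  (s.filter (fun x => x != 0)) ++ (s.filter (fun x => x == 0))   -- nonzeros + zeros

-- ===== PRECONDITION & SPEC =====
def Spec_rearrangesList (list1 : List Int) (out : List Int) : Prop := out = rearrangesList_alt list1
instance (list1 : List Int) (out : List Int) : Decidable (Spec_rearrangesList list1 out) := by unfold Spec_rearrangesList; infer_instance

-- ===== CLAIM (what is proved, stated in full; the proofs are below) =====
def Claim_equal_rearrangesList : Prop := ∀ (list1 : List Int), Dom_rearrangesList list1 → Spec_rearrangesList list1 (rearrangesList list1)

-- ===== LEMMAS AND PROOFS =====

-- One loop step at an in-range index.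
theorem pvLoopA_step (fuel i : Nat) (l : List Int) (n : Int)
    (h : PySem.List.pyGet? l (i : Int) = some n) :
    pvLoopA (fuel+1) i l =
      pvLoopA fuel (i+1)
        (if l.contains n then
          if n = 0 then ((PySem.List.remove? l n).getD l) ++ [n] else l
        else l) := by
  simp [pvLoopA, h]

-- A state of the form N ++ 0^j with N zero-free is frozen: every further iteration either reads a
-- nonzero element (no-op) or reads a 0, removes the first 0 (head of the suffix) and re-appends it.
theorem pvLoopA_frozen (fuel : Nat) : ∀ (i j : Nat) (N : List Int), (∀ x ∈ N, x ≠ 0) →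
    pvLoopA fuel i (N ++ List.replicate j 0) = N ++ List.replicate j 0 := by
  induction fuel with
  | zero => intro i j N _; simp [pvLoopA]
  | succ fuel ih =>
    intro i j N hN
    rcases hget : PySem.List.pyGet? (N ++ List.replicate j 0) (i : Int) with _ | n
    · simp [pvLoopA, hget]
    · have hmem : n ∈ N ++ List.replicate j 0 := PySem.List.mem_of_pyGet?_eq_some _ hget
      rw [pvLoopA_step fuel i _ n hget]
      by_cases hn : n = 0
      · subst hn
        have hj : 0 < j := by
          rcases List.mem_append.mp hmem with h0 | h0
          · exact absurd rfl (hN _ h0)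
          · exact Nat.pos_of_ne_zero (by rintro rfl; simp at h0)
        have hNot : (0:Int) ∉ N := fun h0 => hN _ h0 rfl
        have herase : (N ++ List.replicate j 0).erase 0 = N ++ List.replicate (j-1) 0 := by
          rw [List.erase_append_right _ hNot]
          rcases Nat.exists_eq_add_of_lt hj with ⟨j', rfl⟩
          simp [List.replicate_succ]
        rw [if_pos (List.contains_iff_mem.mpr hmem), if_pos rfl,
            PySem.List.remove?_eq_some_erase _ _ hmem]
        simp only [Option.getD_some, herase]
        have : N ++ List.replicate (j-1) 0 ++ [(0:Int)] = N ++ List.replicate j 0 := by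
          rw [List.append_assoc, ← List.replicate_succ']
          congr 2
          omega
        rw [this]
        exact ih _ _ _ hN
      · rw [if_pos (List.contains_iff_mem.mpr hmem), if_neg hn]
        exact ih _ _ _ hN

-- Scanning a zero-free segment P starting at index |D| is a pure index walk: the state is unchanged.
theorem pvLoopA_scan (P : List Int) : ∀ (D M : List Int) (fuel : Nat), (∀ x ∈ P, x ≠ 0) →
    pvLoopA (P.length + fuel) D.length (D ++ (P ++ M)) =
      pvLoopA fuel (D.length + P.length) (D ++ (P ++ M)) := by
  induction P with
  | nil => intro D M fuel _; simp
  | cons x P ih =>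
    intro D M fuel hP
    have hx : x ≠ 0 := hP x (by simp)
    have hget : PySem.List.pyGet? (D ++ (x :: (P ++ M))) ((D.length : Nat) : Int) = some x :=
      PySem.List.pyGet?_append_length D (P ++ M) x
    have hstep := pvLoopA_step (P.length + fuel) D.length (D ++ (x :: (P ++ M))) x hget
    have hmem : x ∈ D ++ (x :: (P ++ M)) := by simp
    rw [if_pos (List.contains_iff_mem.mpr hmem), if_neg hx] at hstep
    have hL : (x :: P).length + fuel = (P.length + fuel) + 1 := by simp [Nat.add_comm, Nat.add_assoc]
    calc pvLoopA ((x :: P).length + fuel) D.length (D ++ (x :: P ++ M))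
        = pvLoopA (P.length + fuel + 1) D.length (D ++ (x :: (P ++ M))) := by rw [hL]; simp
      _ = pvLoopA (P.length + fuel) (D.length + 1) (D ++ (x :: (P ++ M))) := hstep
      _ = pvLoopA (P.length + fuel) (D ++ [x]).length ((D ++ [x]) ++ (P ++ M)) := by
            simp [List.append_assoc]
      _ = pvLoopA fuel ((D ++ [x]).length + P.length) ((D ++ [x]) ++ (P ++ M)) :=
            ih (D ++ [x]) M fuel (fun y hy => hP y (List.mem_cons_of_mem _ hy))
      _ = pvLoopA fuel (D.length + (x :: P).length) (D ++ (x :: P ++ M)) := by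
            simp [List.append_assoc, Nat.add_comm, Nat.add_left_comm]

-- Draining: the pointer sits at or beyond the zero-suffix region; each step moves the first of the
-- m middle zeros to the end, until m = 0 and the state is frozen.
theorem pvLoopA_drain : ∀ (m j : Nat) (P B : List Int) (i fuel : Nat),
    (∀ x ∈ P, x ≠ 0) → (∀ x ∈ B, x ≠ 0) →
    P.length + m + B.length ≤ i →
    i + m ≤ P.length + m + B.length + j →
    P.length + m + B.length + j ≤ i + fuel →
    pvLoopA fuel i (P ++ List.replicate m 0 ++ B ++ List.replicate j 0) =
      P ++ B ++ List.replicate (m + j) 0 := by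
  intro m
  induction m with
  | zero =>
    intro j P B i fuel hP hB _ _ _
    have hN : ∀ x ∈ P ++ B, x ≠ 0 := by
      intro x hx; rcases List.mem_append.mp hx with h | h
      · exact hP x h
      · exact hB x h
    have := pvLoopA_frozen fuel i j (P ++ B) hN
    simpa [List.append_assoc] using this
  | succ m ih =>
    intro j P B i fuel hP hB h1 h2 h3
    set l := P ++ List.replicate (m+1) 0 ++ B ++ List.replicate j 0 with hl
    have hlen : l.length = P.length + (m+1) + B.length + j := by
      rw [hl]; simp only [List.length_append, List.length_replicate]
    have hi_lt : i < l.length := by omega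
    rcases fuel with _ | fuel
    · omega
    have h4 : (P ++ List.replicate (m+1) 0 ++ B).length ≤ i := by
      simp only [List.length_append, List.length_replicate]; omega
    have h5 : i - (P ++ List.replicate (m+1) 0 ++ B).length < j := by
      simp only [List.length_append, List.length_replicate]; omega
    have hget : PySem.List.pyGet? l (i : Int) = some 0 := by
      rw [PySem.List.pyGet?_natCast, hl, List.getElem?_append_right h4, List.getElem?_replicate,
          if_pos h5]
    have hmem : (0:Int) ∈ l := PySem.List.mem_of_pyGet?_eq_some _ hget
    rw [pvLoopA_step fuel i l 0 hget, if_pos (List.contains_iff_mem.mpr hmem), if_pos rfl,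
        PySem.List.remove?_eq_some_erase _ _ hmem]
    have hNotP : (0:Int) ∉ P := fun h0 => hP _ h0 rfl
    have herase : l.erase 0 = P ++ List.replicate m 0 ++ B ++ List.replicate j 0 := by
      rw [hl, List.append_assoc, List.append_assoc, List.erase_append_right _ hNotP,
          List.replicate_succ]
      simp [List.append_assoc]
    rw [herase]
    simp only [Option.getD_some]
    have hshape : (P ++ List.replicate m 0 ++ B ++ List.replicate j 0) ++ [(0:Int)]
        = P ++ List.replicate m 0 ++ B ++ List.replicate (j+1) 0 := by
      simp [List.append_assoc, ← List.replicate_succ']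
    rw [hshape]
    have hrec := ih (j+1) P B (i+1) fuel hP hB (by omega) (by omega) (by omega)
    rw [hrec]
    congr 2
    omega

-- Phase 2: pointer at index |P| + j over state P ++ 0^m ++ B ++ 0^j.
theorem pvLoopA_phase2 : ∀ (m j : Nat) (P B : List Int) (fuel : Nat),
    (∀ x ∈ P, x ≠ 0) → (∀ x ∈ B, x ≠ 0) →
    P.length + m + B.length + j ≤ (P.length + j) + fuel →
    pvLoopA fuel (P.length + j) (P ++ List.replicate m 0 ++ B ++ List.replicate j 0) =
      P ++ B ++ List.replicate (m + j) 0 := by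
  intro m
  induction m with
  | zero =>
    intro j P B fuel hP hB _
    have hN : ∀ x ∈ P ++ B, x ≠ 0 := by
      intro x hx; rcases List.mem_append.mp hx with h | h
      · exact hP x h
      · exact hB x h
    have := pvLoopA_frozen fuel (P.length + j) j (P ++ B) hN
    simpa [List.append_assoc] using this
  | succ m ih =>
    intro j P B fuel hP hB hf
    by_cases hj : j < m + 1
    · -- the pointer sits inside the middle block of zeros: move one to the end
      rcases fuel with _ | fuel
      · omega
      set l := P ++ List.replicate (m+1) 0 ++ B ++ List.replicate j 0 with hl
      have hget : PySem.List.pyGet? l ((P.length + j : Nat) : Int) = some 0 := by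
        rw [PySem.List.pyGet?_natCast]
        have e : l = P ++ (List.replicate (m+1) 0 ++ (B ++ List.replicate j 0)) := by
          rw [hl]; simp [List.append_assoc]
        rw [e, List.getElem?_append_right (Nat.le_add_right _ _)]
        have e2 : P.length + j - P.length = j := by omega
        rw [e2, List.getElem?_append_left (by simpa using hj)]
        simp [hj]
      have hmem : (0:Int) ∈ l := PySem.List.mem_of_pyGet?_eq_some _ hget
      rw [pvLoopA_step fuel (P.length + j) l 0 hget, if_pos (List.contains_iff_mem.mpr hmem),
          if_pos rfl, PySem.List.remove?_eq_some_erase _ _ hmem]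
      have hNotP : (0:Int) ∉ P := fun h0 => hP _ h0 rfl
      have herase : l.erase 0 = P ++ List.replicate m 0 ++ B ++ List.replicate j 0 := by
        rw [hl, List.append_assoc, List.append_assoc, List.erase_append_right _ hNotP,
            List.replicate_succ]
        simp [List.append_assoc]
      rw [herase]
      simp only [Option.getD_some]
      have hshape : (P ++ List.replicate m 0 ++ B ++ List.replicate j 0) ++ [(0:Int)]
          = P ++ List.replicate m 0 ++ B ++ List.replicate (j+1) 0 := by
        simp [List.append_assoc, ← List.replicate_succ']
      rw [hshape]
      have hrec := ih (j+1) P B fuel hP hB (by omega)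
      rw [show P.length + j + 1 = P.length + (j+1) by omega, hrec]
      congr 2
      omega
    · by_cases ht : j - (m+1) < B.length
      · -- scan the remaining nonzero elements of B, then drain
        have hfuel : B.length - (j - (m+1)) ≤ fuel := by omega
        set t := j - (m+1) with htdef
        set P' := B.drop t with hP'def
        have hP'0 : ∀ x ∈ P', x ≠ 0 := fun x hx => hB x (List.mem_of_mem_drop hx)
        set D := P ++ List.replicate (m+1) 0 ++ B.take t with hDdef
        have hDlen : D.length = P.length + j := by
          rw [hDdef]
          simp only [List.length_append, List.length_replicate, List.length_take]
          omega
        have hstate : P ++ List.replicate (m+1) 0 ++ B ++ List.replicate j 0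
            = D ++ (P' ++ List.replicate j 0) := by
          rw [hDdef, hP'def]
          simp only [List.append_assoc]
          rw [← List.append_assoc (List.take t B), List.take_append_drop]
        have hfe : fuel = P'.length + (fuel - P'.length) := by
          rw [hP'def]; simp only [List.length_drop]; omega
        have hsc := pvLoopA_scan P' D (List.replicate j 0) (fuel - P'.length) hP'0
        have hdr := pvLoopA_drain (m+1) j P B (P.length + (m+1) + B.length) (fuel - P'.length)
          hP hB (le_refl _) (by omega)
          (by rw [hP'def]; simp only [List.length_drop]; omega)
        rw [show P.length + j = D.length from hDlen.symm, hstate, hfe, hsc, ← hstate,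
            show D.length + P'.length = P.length + (m+1) + B.length by
              rw [hDlen, hP'def]; simp only [List.length_drop]; omega]
        exact hdr
      · -- the pointer is already inside the zero suffix: drain directly
        exact pvLoopA_drain (m+1) j P B (P.length + j) fuel hP hB (by omega) (by omega)
          (by omega)

-- Sorted decomposition: a ≤-pairwise list is its negatives, then its zeros, then its positives.
theorem sorted_decomp : ∀ (s : List Int), s.Pairwise (· ≤ ·) →
    s = s.filter (fun x => decide (x < 0)) ++ s.filter (fun x => x == 0)
        ++ s.filter (fun x => decide (0 < x)) := by
  intro s
  induction s with
  | nil => intro _; simp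
  | cons a t ih =>
    intro hs
    obtain ⟨ha, ht⟩ := List.pairwise_cons.mp hs
    have iht := ih ht
    rcases lt_trichotomy a 0 with h | h | h
    · simp only [List.filter_cons, decide_eq_true_eq]
      rw [if_pos h, if_neg (by simp; omega), if_neg (by omega)]
      simpa using iht
    · subst h
      have h1 : t.filter (fun x => decide (x < 0)) = [] :=
        List.filter_eq_nil_iff.mpr (fun x hx => by simpa using not_lt.mpr (ha x hx))
      simp only [List.filter_cons, decide_eq_true_eq]
      rw [if_neg (by omega), if_pos (by simp), if_neg (by omega), h1]
      rw [h1] at iht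
      simpa using iht
    · have hpos : ∀ x ∈ t, 0 < x := fun x hx => lt_of_lt_of_le h (ha x hx)
      have h1 : t.filter (fun x => decide (x < 0)) = [] :=
        List.filter_eq_nil_iff.mpr (fun x hx => by simpa using not_lt.mpr (hpos x hx).le)
      have h2 : t.filter (fun x => x == 0) = [] :=
        List.filter_eq_nil_iff.mpr (fun x hx => by simpa using (hpos x hx).ne')
      simp only [List.filter_cons, decide_eq_true_eq]
      rw [if_neg (by omega), if_neg (by simp; omega), if_pos h, h1, h2]
      rw [h1, h2] at iht
      simpa using iht

-- ===== VERDICT (by name: the statement is the Claim_ definition above) =====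
-- The whole loop on a list of shape P ++ 0^k ++ Q (P, Q zero-free) moves the zeros to the end.
theorem pvLoopA_main (P Q : List Int) (k : Nat)
    (hP0 : ∀ x ∈ P, x ≠ 0) (hQ0 : ∀ x ∈ Q, x ≠ 0) :
    pvLoopA (P ++ List.replicate k 0 ++ Q).length 0 (P ++ List.replicate k 0 ++ Q)
      = P ++ Q ++ List.replicate k 0 := by
  have elen : (P ++ List.replicate k 0 ++ Q).length = P.length + (k + Q.length) := by
    simp only [List.length_append, List.length_replicate]; omega
  have e : P ++ List.replicate k 0 ++ Q
      = [] ++ (P ++ (List.replicate k 0 ++ Q ++ List.replicate 0 0)) := by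
    simp [List.append_assoc]
  rw [elen, e]
  have hsc := pvLoopA_scan P [] (List.replicate k 0 ++ Q ++ List.replicate 0 0)
      (k + Q.length) hP0
  simp only [List.length_nil] at hsc
  rw [hsc]
  have hph := pvLoopA_phase2 k 0 P Q (k + Q.length) hP0 hQ0 (by omega)
  simpa [List.append_assoc] using hph

theorem rearrangesList_spec : Claim_equal_rearrangesList := by
  intro l _
  simp only [Spec_rearrangesList, rearrangesList, rearrangesList_alt]
  generalize hsdef : PySem.List.sorted l (fun x => x) false = s
  have hpw0 : s.Pairwise (fun a b => (fun x : Int => x) a ≤ (fun x : Int => x) b) := by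
    rw [← hsdef]
    exact PySem.List.sorted_pairwise l (fun x : Int => x)
  have hpw : s.Pairwise (· ≤ ·) := hpw0
  have hdec := sorted_decomp s hpw
  set P := s.filter (fun x => decide (x < 0)) with hPdef
  set Zs := s.filter (fun x => x == 0) with hZdef
  set Q := s.filter (fun x => decide (0 < x)) with hQdef
  have hZs : Zs = List.replicate Zs.length 0 := by
    apply List.eq_replicate_iff.mpr
    refine ⟨rfl, fun b hb => ?_⟩
    have := (List.mem_filter.mp hb).2
    simpa using this
  have hP0 : ∀ x ∈ P, x ≠ 0 := by
    intro x hx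
    have := (List.mem_filter.mp hx).2
    simp at this; omega
  have hQ0 : ∀ x ∈ Q, x ≠ 0 := by
    intro x hx
    have := (List.mem_filter.mp hx).2
    simp at this; omega
  have hBP : P.filter (fun x => x != 0) = P :=
    List.filter_eq_self.mpr (fun x hx => by simpa using hP0 x hx)
  have hBQ : Q.filter (fun x => x != 0) = Q :=
    List.filter_eq_self.mpr (fun x hx => by simpa using hQ0 x hx)
  have hBZ : Zs.filter (fun x => x != 0) = [] := by
    rw [hZs]
    apply List.filter_eq_nil_iff.mpr
    intro x hx
    simp [List.eq_of_mem_replicate hx]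
  have hBside : s.filter (fun x => x != 0) = P ++ Q := by
    conv_lhs => rw [hdec]
    rw [List.filter_append, List.filter_append, hBP, hBQ, hBZ, List.append_nil]
  rw [hBside]
  have hs2 : s = P ++ List.replicate Zs.length 0 ++ Q := by
    conv_lhs => rw [hdec]
    rw [← hZs]
  rw [hs2, pvLoopA_main P Q Zs.length hP0 hQ0, hZs]
  simp [List.append_assoc]
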